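-- pv_equiv track=rewrite | github.com/selinux/vmm-sca | tools/experiments.py | max_nb_of_measures
-- ===== SOURCE A (Python) =====
-- from enum import Enum
--
-- class Prim_sca(Enum):
--     PRIMITIVE_WAIT = 1
--     PRIMITIVE_MEASURE = 2
--     PRIMITIVE_READ = 3
--     PRIMITIVE_WRITE = 4
--     PRIMITIVE_PRINT_MEASURES = 5
--     PRIMITIVE_EXIT = 6
--
-- def max_nb_of_measures(data):
--     """return the number of timestamps needed by data experiment
--
--     """
--     nb = []
--     for mes_lst in data.values():
--         res = len([_ for _ in mes_lst if _['cmd'] == Prim_sca.PRIMITIVE_MEASURE.value])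
--         res += len([_ for _ in mes_lst if _['cmd'] == Prim_sca.PRIMITIVE_READ.value])*2
--         res += len([_ for _ in mes_lst if _['cmd'] == Prim_sca.PRIMITIVE_WRITE.value])*2
--         nb.append(res)
--     return max(nb)
-- ===== SOURCE B (Python) =====
-- _WEIGHTS = {2: 1, 3: 2, 4: 2}  # PRIMITIVE_MEASURE:1, PRIMITIVE_READ:2, PRIMITIVE_WRITE:2
--
-- def max_nb_of_measures(data):
--     """return the number of timestamps needed by data experiment"""
--     return max(sum(_WEIGHTS.get(item['cmd'], 0) for item in mes_lst)
--                for mes_lst in data.values())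
-- ===== Notes on version B (the rewrite author's own statement) =====
-- stated objective: simpler
-- what changed: Replaces the three filter-comprehension scans per list and the accumulated nb list with a single table-driven pass: one weight dict {MEASURE:1, READ:2, WRITE:2} summed over each list, with max taken over a generator.
import Mathlib
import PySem

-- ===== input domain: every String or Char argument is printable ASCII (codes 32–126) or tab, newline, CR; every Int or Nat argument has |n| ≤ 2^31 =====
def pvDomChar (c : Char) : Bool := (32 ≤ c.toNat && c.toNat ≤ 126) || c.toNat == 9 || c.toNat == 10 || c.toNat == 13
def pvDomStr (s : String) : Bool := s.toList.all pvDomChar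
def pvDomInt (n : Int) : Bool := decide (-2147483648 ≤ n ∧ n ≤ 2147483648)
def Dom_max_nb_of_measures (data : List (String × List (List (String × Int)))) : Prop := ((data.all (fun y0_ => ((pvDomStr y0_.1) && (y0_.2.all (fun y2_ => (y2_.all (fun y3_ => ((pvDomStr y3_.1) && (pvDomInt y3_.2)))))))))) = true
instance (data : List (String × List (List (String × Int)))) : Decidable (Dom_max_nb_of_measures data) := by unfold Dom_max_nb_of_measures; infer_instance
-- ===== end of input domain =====

-- B replaces A's three filter-comprehension scans per list (and the accumulated nb list)
-- with a single table-driven pass summing a weight dict over each list; return value only.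

-- item['cmd'] on an assoc-list dict: first match (Python dicts have unique keys)
def pvCmd? (item : List (String × Int)) : Option Int :=
  (item.find? (fun p => p.1 == "cmd")).map (·.2)

-- ===== PORT A =====
def max_nb_of_measures (data : List (String × List (List (String × Int)))) : Int :=
  let nb : List Int := data.foldl (fun nb kv =>
    let mes_lst := kv.2
    let res : Int := ((mes_lst.filter (fun it => pvCmd? it == some 2)).length : Int)
    let res := res + ((mes_lst.filter (fun it => pvCmd? it == some 3)).length : Int) * 2
    let res := res + ((mes_lst.filter (fun it => pvCmd? it == some 4)).length : Int) * 2
    nb ++ [res]) []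
  (PySem.List.max? nb (fun x => x)).getD 0   -- max(nb); Pre_ excludes empty data (ValueError)

-- ===== PORT B =====
def pvWeights : PySem.Dict Int Int := PySem.Dict.ofList [((2:Int),(1:Int)),(3,2),(4,2)]

def max_nb_of_measures_alt (data : List (String × List (List (String × Int)))) : Int :=
  (PySem.List.max?
    (data.map (fun kv =>
      kv.2.foldl (fun acc it => acc + pvWeights.getD ((pvCmd? it).getD 0) 0) 0))
    (fun x => x)).getD 0   -- max(generator); Pre_ excludes empty data (ValueError)

-- ===== PRECONDITION & SPEC =====
-- Pre_ excludes exactly the inputs where the Pythons raise: empty data (max of an empty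
-- sequence, ValueError) and items missing the 'cmd' key (KeyError in both A and B).
def Pre_max_nb_of_measures (data : List (String × List (List (String × Int)))) : Prop :=
  data ≠ [] ∧ ∀ kv ∈ data, ∀ it ∈ kv.2, (pvCmd? it).isSome
instance (data : List (String × List (List (String × Int)))) : Decidable (Pre_max_nb_of_measures data) := by unfold Pre_max_nb_of_measures; infer_instance

def pvWitness_max_nb_of_measures : (List (String × List (List (String × Int)))) :=
  [("x", [[("cmd", 2)], [("cmd", 3)]]), ("y", [[("cmd", 4)]])]

def Spec_max_nb_of_measures (data : List (String × List (List (String × Int)))) (out : Int) : Prop := out = max_nb_of_measures_alt data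
instance (data : List (String × List (List (String × Int)))) (out : Int) : Decidable (Spec_max_nb_of_measures data out) := by unfold Spec_max_nb_of_measures; infer_instance

-- ===== CLAIM (what is proved, stated in full; the proofs are below) =====
def Claim_equal_max_nb_of_measures : Prop := ∀ (data : List (String × List (List (String × Int)))), Dom_max_nb_of_measures data → Pre_max_nb_of_measures data → Spec_max_nb_of_measures data (max_nb_of_measures data)

-- ===== LEMMAS AND PROOFS =====

-- weight-table lookup as a closed if-chain (B's dict is a 3-entry literal)
lemma weight_eq (c : Int) : PySem.Dict.getD pvWeights c 0
    = (if c = 2 then (1:Int) else if c = 3 then 2 else if c = 4 then 2 else 0) := by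
  have h : pvWeights = PySem.Dict.mk [((2:Int),(1:Int)),(3,2),(4,2)] := by decide
  rw [h]
  simp only [PySem.Dict.getD, PySem.Dict.get?_mk_cons]
  split_ifs <;> simp_all [PySem.Dict.get?]

-- per-list: A's three weighted filter-counts equal B's single weighted sum (unconditionally:
-- an item without 'cmd' matches no filter and gets weight 0 in B)
lemma per_list_eq (lst : List (List (String × Int))) :
    ((lst.filter (fun it => pvCmd? it == some 2)).length : Int)
      + ((lst.filter (fun it => pvCmd? it == some 3)).length : Int) * 2
      + ((lst.filter (fun it => pvCmd? it == some 4)).length : Int) * 2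
    = lst.foldl (fun acc it => acc + pvWeights.getD ((pvCmd? it).getD 0) 0) 0 := by
  rw [PySem.List.foldl_add, zero_add]
  induction lst with
  | nil => simp
  | cons h t ih =>
    simp only [List.filter_cons, List.map_cons, List.sum_cons]
    rcases pvCmd? h with _ | c
    · simpa [weight_eq] using ih
    · simp only [weight_eq, Option.getD_some] at ih ⊢
      split_ifs <;> simp_all <;> omega

theorem max_nb_of_measures_spec : Claim_equal_max_nb_of_measures := by
  intro data _ _
  unfold Spec_max_nb_of_measures max_nb_of_measures max_nb_of_measures_alt
  simp only [PySem.List.foldl_append_singleton_eq_map, List.nil_append]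
  congr 2
  exact List.map_congr_left (fun kv _ => per_list_eq kv.2)
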